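-- pv_equiv track=rewrite | github.com/Tratut/SchoolTask | ft_oct_num.py | ft_oct_num
-- ===== SOURCE A (Python) =====
-- def ft_oct_num(x):
--     cop = x
--     b = 0
--     i = 0
--
--     while cop > 0:
--         b = (cop % 8) * 10 ** i + b
--         cop //= 8
--         i += 1
--     return b
-- ===== SOURCE B (Python) =====
-- def ft_oct_num(x):
--     digits = []
--     while x > 0:
--         digits.append(x % 8)
--         x //= 8
--     result = 0
--     for d in reversed(digits):
--         result = result * 10 + d
--     return result
-- ===== Notes on version B (the rewrite author's own statement) =====
-- stated objective: alternative
-- what changed: Replaces A's single accumulator loop with an explicit power-of-ten counter by two staged passes: first collect the octal digits into a list, then Horner-fold the reversed list into a decimal-digit integer with no power computation.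
import Mathlib
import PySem

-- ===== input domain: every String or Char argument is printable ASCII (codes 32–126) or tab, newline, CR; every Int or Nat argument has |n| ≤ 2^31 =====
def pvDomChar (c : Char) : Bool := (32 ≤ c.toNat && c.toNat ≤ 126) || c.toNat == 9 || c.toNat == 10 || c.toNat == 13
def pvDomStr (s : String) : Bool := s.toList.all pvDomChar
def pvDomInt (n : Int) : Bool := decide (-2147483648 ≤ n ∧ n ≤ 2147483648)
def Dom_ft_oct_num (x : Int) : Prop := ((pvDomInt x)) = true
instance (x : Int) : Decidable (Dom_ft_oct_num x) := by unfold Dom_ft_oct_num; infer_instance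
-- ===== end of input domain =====

-- B replaces A's accumulator-with-power loop by two staged passes (collect octal digits, then a Horner fold over the reversed list); alternative decomposition, same cost.


-- termination fact shared by both ports' loops (cited in decreasing_by)
theorem pvFloordiv8_toNat_lt (x : Int) (h : 0 < x) :
    (PySem.Int.floordiv x 8).toNat < x.toNat := by
  rw [PySem.Int.floordiv_eq_ediv_of_pos (by omega)]
  have h2 : x / 8 ≤ x := Int.ediv_le_self 8 (by omega)
  have h3 : 0 ≤ x / 8 := Int.ediv_nonneg (by omega) (by omega)
  have h4 : x / 8 ≠ x := by
    intro he
    have := Int.emod_add_ediv x 8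
    have hm : 0 ≤ x % 8 := Int.emod_nonneg x (by omega)
    omega
  omega

-- ===== PORT A =====
-- the while loop, state (cop, b, i)
def ftOctLoopA (cop b : Int) (i : Nat) : Int :=
  if h : cop > 0 then
    ftOctLoopA (PySem.Int.floordiv cop 8) (PySem.Int.mod cop 8 * 10 ^ i + b) (i + 1)
  else b
termination_by cop.toNat
decreasing_by exact pvFloordiv8_toNat_lt _ h

def ft_oct_num (x : Int) : Int := ftOctLoopA x 0 0

-- ===== PORT B =====
-- pass 1: collect the octal digits, least significant first (the while loop with digits.append)
def ftOctDigitsB (x : Int) : List Int :=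
  if h : x > 0 then PySem.Int.mod x 8 :: ftOctDigitsB (PySem.Int.floordiv x 8) else []
termination_by x.toNat
decreasing_by exact pvFloordiv8_toNat_lt _ h

-- pass 2: Horner fold over the reversed digit list
def ft_oct_num_alt (x : Int) : Int :=
  (ftOctDigitsB x).reverse.foldl (fun result d => result * 10 + d) 0

-- ===== PRECONDITION & SPEC =====
def Spec_ft_oct_num (x : Int) (out : Int) : Prop := out = ft_oct_num_alt x
instance (x : Int) (out : Int) : Decidable (Spec_ft_oct_num x out) := by unfold Spec_ft_oct_num; infer_instance

-- ===== CLAIM (what is proved, stated in full; the proofs are below) =====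
def Claim_equal_ft_oct_num : Prop := ∀ (x : Int), Dom_ft_oct_num x → Spec_ft_oct_num x (ft_oct_num x)

-- ===== LEMMAS AND PROOFS =====
-- B's value satisfies the head recurrence: peeling the least significant digit multiplies the rest by 10
theorem ft_oct_num_alt_rec (x : Int) (h : x > 0) :
    ft_oct_num_alt x = ft_oct_num_alt (PySem.Int.floordiv x 8) * 10 + PySem.Int.mod x 8 := by
  unfold ft_oct_num_alt
  rw [ftOctDigitsB, dif_pos h]
  simp [List.foldl_append]

theorem ft_oct_num_alt_nonpos (x : Int) (h : ¬ x > 0) : ft_oct_num_alt x = 0 := by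
  unfold ft_oct_num_alt
  rw [ftOctDigitsB, dif_neg h]
  simp

-- loop invariant: A's accumulator form equals B's value shifted by 10^i
theorem ftOctLoopA_eq (cop b : Int) (i : Nat) :
    ftOctLoopA cop b i = ft_oct_num_alt cop * 10 ^ i + b := by
  induction cop, b, i using ftOctLoopA.induct with
  | case1 cop b i h ih =>
    rw [ftOctLoopA, dif_pos h, ih, ft_oct_num_alt_rec cop h]
    ring
  | case2 cop b i h =>
    rw [ftOctLoopA, dif_neg h, ft_oct_num_alt_nonpos cop h]
    ring

-- ===== VERDICT (by name: the statement is the Claim_ definition above) =====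
theorem ft_oct_num_spec : Claim_equal_ft_oct_num := by
  intro x _
  show ft_oct_num x = ft_oct_num_alt x
  rw [ft_oct_num, ftOctLoopA_eq]
  ring
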